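-- pv_equiv track=rewrite | github.com/kamilGie/ASRT-WDI | Kolokwia/Kolokwium_Poprawkowe/2023_4B/szablon2023_4B.py | cutting
-- ===== SOURCE A (Python) =====
-- def cutting(slowo):
--     samogloski = ["a", "e", "i", "o", "u"]
--
--     # tablica pozycji samoglosek w slowo
--     pozycje = []
--     for i in range(len(slowo)):
--         if slowo[i] in samogloski:
--             pozycje.append(i)
--
--     # liczba możliwych kombinacji to odległości między samogloskami
--     res = 1
--     for i in range(1, len(pozycje)):
--         res *= pozycje[i] - pozycje[i - 1]
--
--     return res
-- ===== SOURCE B (Python) =====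
-- def cutting(slowo):
--     norm = slowo
--     for v in "eiou":
--         norm = norm.replace(v, "a")
--     res = 1
--     for part in norm.split("a")[1:-1]:
--         res *= len(part) + 1
--     return res
-- ===== Notes on version B (the rewrite author's own statement) =====
-- stated objective: faster
-- what changed: Instead of collecting vowel indices in a list and multiplying index differences, B normalizes every vowel to one marker character via str.replace, splits the string on that marker, and multiplies (segment length + 1) over the interior segments; the gap between consecutive vowels equals the length of the text between them plus one.
import Mathlib
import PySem

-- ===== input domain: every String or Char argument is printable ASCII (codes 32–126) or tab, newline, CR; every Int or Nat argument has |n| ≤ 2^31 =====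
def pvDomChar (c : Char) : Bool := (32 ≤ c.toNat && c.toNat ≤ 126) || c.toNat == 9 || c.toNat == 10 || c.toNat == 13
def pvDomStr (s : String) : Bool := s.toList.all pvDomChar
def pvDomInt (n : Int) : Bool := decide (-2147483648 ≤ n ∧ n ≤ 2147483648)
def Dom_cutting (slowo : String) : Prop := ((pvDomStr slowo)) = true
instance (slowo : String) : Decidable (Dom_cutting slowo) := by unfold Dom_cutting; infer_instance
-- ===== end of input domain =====

-- B replaces A's index bookkeeping (positions list + gap-subtraction loop) by string surgery: normalize every
-- vowel to one marker character, split on it, and multiply (segment length + 1) over the interior segments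
-- (objective: faster by a constant factor — C-level replace/split instead of a per-character Python loop).

-- ===== PORT A =====
def cutting (slowo : String) : Int :=
  let samogloski : List Char := ['a', 'e', 'i', 'o', 'u']
  let cs := slowo.toList
  let pozycje : List Int :=
    (PySem.List.pyRange 0 (cs.length : Int) 1).foldl
      (fun acc i => if PySem.List.pyGetD cs i ' ' ∈ samogloski then acc ++ [i] else acc) []
  (PySem.List.pyRange 1 (pozycje.length : Int) 1).foldl
    (fun res i => res * (PySem.List.pyGetD pozycje i 0 - PySem.List.pyGetD pozycje (i - 1) 0)) 1

-- ===== PORT B =====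
def cutting_alt (slowo : String) : Int :=
  let norm : List Char :=
    ['e', 'i', 'o', 'u'].foldl (fun n v => PySem.Chars.replace n [v] ['a']) slowo.toList
  (PySem.List.slice (PySem.Chars.splitOn norm ['a']) (some 1) (some (-1))).foldl
    (fun res part => res * ((part.length : Int) + 1)) 1

-- ===== PRECONDITION & SPEC =====
def Spec_cutting (slowo : String) (out : Int) : Prop := out = cutting_alt slowo
instance (slowo : String) (out : Int) : Decidable (Spec_cutting slowo out) := by unfold Spec_cutting; infer_instance

-- ===== CLAIM (what is proved, stated in full; the proofs are below) =====
def Claim_equal_cutting : Prop := ∀ (slowo : String), Dom_cutting slowo → Spec_cutting slowo (cutting slowo)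

-- ===== LEMMAS AND PROOFS =====

-- vowel positions collected from an enumerated list
def pvVpos (l : List (Int × Char)) : List Int :=
  (l.filter (fun p => p.2 ∈ ['a', 'e', 'i', 'o', 'u'])).map (·.1)

-- product of gaps between consecutive positions
def pvGapProd (l : List Int) : Int :=
  (List.zipWith (fun a b => b - a) l l.tail).prod

-- vowel normalization: what B's four replaces do to a single character
def pvNorm (c : Char) : Char := if c ∈ ['a', 'e', 'i', 'o', 'u'] then 'a' else c

-- gap-product computed by direct recursion on the characters (common middle form)
def pvRec2 : List Char → Int → Int
  | [], _ => 1
  | c :: t, d => if c ∈ ['a', 'e', 'i', 'o', 'u'] then d * pvRec2 t 1 else pvRec2 t (d + 1)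

def pvRec1 : List Char → Int
  | [] => 1
  | c :: t => if c ∈ ['a', 'e', 'i', 'o', 'u'] then pvRec2 t 1 else pvRec1 t

-- structural form of splitting a char list on 'a'
def pvSplitA : List Char → List (List Char)
  | [] => [[]]
  | c :: t =>
    if c = 'a' then [] :: pvSplitA t
    else match pvSplitA t with
         | [] => [[c]]
         | p :: ps => (c :: p) :: ps

-- prepend to the head part
def pvConsH (x : List Char) : List (List Char) → List (List Char)
  | [] => [x]
  | p :: ps => (x ++ p) :: ps

-- gap product read off a parts list
def pvGp : List (List Char) → Int → Int
  | [], _ => 1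
  | [_], _ => 1
  | p :: q :: rest, d => (d + p.length) * pvGp (q :: rest) 1

def pvInterior (parts : List (List Char)) : Int :=
  ((parts.drop 1).dropLast.map (fun p => (p.length : Int) + 1)).prod

lemma pvVpos_cons (x : Int × Char) (t : List (Int × Char)) :
    pvVpos (x :: t) = if x.2 ∈ ['a', 'e', 'i', 'o', 'u'] then x.1 :: pvVpos t else pvVpos t := by
  by_cases hv : x.2 ∈ ['a', 'e', 'i', 'o', 'u'] <;>
    · have hv' := hv
      simp only [List.mem_cons, List.not_mem_nil, or_false] at hv'
      simp [pvVpos, hv, hv']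

lemma pvGapProd_cons_cons (p x : Int) (xs : List Int) :
    pvGapProd (p :: x :: xs) = (x - p) * pvGapProd (x :: xs) := by
  simp [pvGapProd]

-- A's first loop: the collected indices are the vowel positions of the enumeration
lemma pvA_pos_gen (CS : List Char) : ∀ (cs : List Char) (s : Nat), cs = CS.drop s →
    (PySem.List.pyRange s (s + cs.length : Int) 1).filter
        (fun i => PySem.List.pyGetD CS i ' ' ∈ ['a', 'e', 'i', 'o', 'u'])
      = pvVpos (PySem.List.enumerate cs (s : Int)) := by
  intro cs
  induction cs with
  | nil =>
    intro s _
    rw [PySem.List.pyRange_one_eq_nil (by simp)]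
    simp [pvVpos, PySem.List.enumerate]
  | cons c t ih =>
    intro s hdrop
    have hlt : (s : Int) < s + (c :: t).length := by
      have h : 0 < ((c :: t).length : Int) := by exact_mod_cast t.length.succ_pos
      omega
    have hs : s < CS.length := by
      by_contra h
      rw [List.drop_eq_nil_of_le (by omega)] at hdrop
      exact List.cons_ne_nil _ _ hdrop
    have hc : CS.getD s ' ' = c := by
      have hsome : CS[s]? = some c := by rw [← List.head?_drop, ← hdrop]; rfl
      simp [List.getD_eq_getElem?_getD, hsome]
    have ht : t = CS.drop (s + 1) := by
      have h1 : CS.drop (s + 1) = (CS.drop s).tail := by rw [List.tail_drop]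
      rw [h1, ← hdrop]
      rfl
    have harith : ((s : Int) + (c :: t).length) = ((s + 1 : Nat) : Int) + t.length := by
      push_cast; simp; ring
    have hstart : (s : Int) + 1 = ((s + 1 : Nat) : Int) := by push_cast; ring
    rw [PySem.List.pyRange_one_cons hlt, List.filter_cons, PySem.List.pyGetD_natCast, hc,
        harith, hstart, ih (s + 1) ht, PySem.List.enumerate_cons, pvVpos_cons]
    by_cases hv : c ∈ ['a', 'e', 'i', 'o', 'u'] <;>
      · have hv' := hv
        simp only [List.mem_cons, List.not_mem_nil, or_false] at hv'
        simp [hv]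

-- a multiply-accumulate loop is the product of the mapped list
lemma pvFoldl_mul {α : Type} (l : List α) (g : α → Int) : ∀ r : Int,
    l.foldl (fun res i => res * g i) r = r * (l.map g).prod := by
  induction l with
  | nil => intro r; simp
  | cons x t ih => intro r; simp [ih]; ring

-- A's second loop maps the index range to the consecutive gaps
lemma pvMap_gaps (ps : List Int) :
    (PySem.List.pyRange 1 (ps.length : Int) 1).map
        (fun i => PySem.List.pyGetD ps i 0 - PySem.List.pyGetD ps (i - 1) 0)
      = List.zipWith (fun a b => b - a) ps ps.tail := by
  apply List.ext_getElem
  · simp only [List.length_map, PySem.List.length_pyRange_one, List.length_zipWith,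
      List.length_tail]
    omega
  · intro j h1 h2
    simp only [List.getElem_map, PySem.List.getElem_pyRange_one]
    have hlen : j + 1 < ps.length := by
      simp only [List.length_map, PySem.List.length_pyRange_one] at h1; omega
    have e1 : (1 : Int) + (j : Int) = ((j + 1 : Nat) : Int) := by push_cast; ring
    have e2 : ((j + 1 : Nat) : Int) - 1 = ((j : Nat) : Int) := by push_cast; ring
    rw [e1, e2, PySem.List.pyGetD_natCast, PySem.List.pyGetD_natCast]
    rw [List.getElem_zipWith]
    rw [List.getD_eq_getElem ps 0 hlen, List.getD_eq_getElem ps 0 (by omega)]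
    rw [List.getElem_tail]

-- A-side bridge: the gap product of the enumerated vowel positions is the direct recursion
lemma pvRec2_gap (t : List Char) : ∀ (j d : Int),
    pvRec2 t d = pvGapProd ((j - d) :: pvVpos (PySem.List.enumerate t j)) := by
  induction t with
  | nil => intro j d; simp [pvRec2, PySem.List.enumerate, pvVpos, pvGapProd]
  | cons c t ih =>
    intro j d
    rw [PySem.List.enumerate_cons, pvVpos_cons]
    by_cases hv : c ∈ ['a', 'e', 'i', 'o', 'u']
    · simp only [pvRec2, hv, if_pos]
      rw [pvGapProd_cons_cons]
      have : pvGapProd (j :: pvVpos (PySem.List.enumerate t (j + 1)))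
          = pvGapProd ((j + 1 - 1) :: pvVpos (PySem.List.enumerate t (j + 1))) := by norm_num
      rw [this, ← ih (j + 1) 1]
      ring
    · simp only [pvRec2, hv, if_false]
      have : j - d = (j + 1) - (d + 1) := by ring
      rw [this, ih (j + 1) (d + 1)]

lemma pvRec1_gap (t : List Char) : ∀ (j : Int),
    pvRec1 t = pvGapProd (pvVpos (PySem.List.enumerate t j)) := by
  induction t with
  | nil => intro j; simp [pvRec1, PySem.List.enumerate, pvVpos, pvGapProd]
  | cons c t ih =>
    intro j
    rw [PySem.List.enumerate_cons, pvVpos_cons]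
    by_cases hv : c ∈ ['a', 'e', 'i', 'o', 'u']
    · simp only [pvRec1, hv, if_pos]
      have : pvGapProd (j :: pvVpos (PySem.List.enumerate t (j + 1)))
          = pvGapProd ((j + 1 - 1) :: pvVpos (PySem.List.enumerate t (j + 1))) := by norm_num
      rw [this, ← pvRec2_gap t (j + 1) 1]
    · simp only [pvRec1, hv, if_false]
      exact ih (j + 1)

-- single-character replace is a character map
lemma pvReplace_go (v : Char) : ∀ (fuel : Nat) (l acc : List Char), l.length = fuel →
    PySem.Chars.replace.go [v] ['a'] fuel l acc
      = acc.reverse ++ l.map (fun c => if c = v then 'a' else c) := by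
  intro fuel
  induction fuel with
  | zero => intro l acc h; rw [List.length_eq_zero_iff] at h; subst h; simp [PySem.Chars.replace.go]
  | succ n ih =>
    intro l acc h
    match l with
    | [] => simp at h
    | c :: t =>
      simp only [List.length_cons, Nat.succ_inj] at h
      rw [PySem.Chars.replace.go]
      have hpre : List.isPrefixOf [v] (c :: t) = (v == c) := by
        simp [List.isPrefixOf]
      by_cases hc : c = v
      · subst hc
        simp only [hpre, BEq.rfl, if_true]
        rw [show List.drop ([c].length) (c :: t) = t from rfl, ih t _ h]
        simp
      · have hvc : (v == c) = false := by simp [Ne.symm hc]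
        simp only [hpre, hvc, Bool.false_eq_true, if_false]
        rw [ih t _ h]
        simp [hc]

lemma pvReplace_single (v : Char) (s : List Char) :
    PySem.Chars.replace s [v] ['a'] = s.map (fun c => if c = v then 'a' else c) := by
  have h0 : PySem.Chars.replace s [v] ['a'] = PySem.Chars.replace.go [v] ['a'] s.length s [] := rfl
  rw [h0, pvReplace_go v s.length s [] rfl]
  simp

-- B's four replaces together normalize every vowel to 'a'
lemma pvNorm_fold (s : List Char) :
    ['e', 'i', 'o', 'u'].foldl (fun n v => PySem.Chars.replace n [v] ['a']) s = s.map pvNorm := by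
  simp only [List.foldl_cons, List.foldl_nil, pvReplace_single, List.map_map]
  apply List.map_congr_left
  intro c _
  simp only [Function.comp_apply, pvNorm]
  by_cases h1 : c = 'e' <;> by_cases h2 : c = 'i' <;> by_cases h3 : c = 'o' <;>
    by_cases h4 : c = 'u' <;> by_cases h5 : c = 'a' <;> simp_all

lemma pvSplitA_ne_nil (l : List Char) : pvSplitA l ≠ [] := by
  match l with
  | [] => simp [pvSplitA]
  | c :: t =>
    rw [pvSplitA]
    split_ifs
    · simp
    · rcases h : pvSplitA t with _ | ⟨p, ps⟩ <;> simp

-- splitOn at a single char computes the structural split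
lemma pvSplit_go (fuel : Nat) : ∀ (l cur : List Char) (acc : List (List Char)),
    l.length < fuel →
    PySem.Chars.splitOn.go ['a'] fuel l cur acc
      = acc.reverse ++ pvConsH cur.reverse (pvSplitA l) := by
  induction fuel with
  | zero => intro l cur acc h; omega
  | succ n ih =>
    intro l cur acc h
    match l with
    | [] =>
      rw [PySem.Chars.splitOn.go]
      · simp [pvSplitA, pvConsH]
      · omega
    | c :: t =>
      simp only [List.length_cons] at h
      rw [PySem.Chars.splitOn.go]
      have hpre : List.isPrefixOf ['a'] (c :: t) = ('a' == c) := by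
        simp [List.isPrefixOf]
      by_cases hc : c = 'a'
      · subst hc
        simp only [hpre, BEq.rfl, if_true]
        rw [show List.drop ([('a' : Char)].length) ('a' :: t) = t from rfl]
        rw [ih t [] _ (by omega)]
        rcases hs : pvSplitA t with _ | ⟨p, ps⟩
        · exact absurd hs (pvSplitA_ne_nil t)
        · simp [pvSplitA, pvConsH, hs]
      · have hac : (('a' : Char) == c) = false := by simp [Ne.symm hc]
        simp only [hpre, hac, Bool.false_eq_true, if_false]
        rw [ih t (c :: cur) acc (by omega)]
        rcases hs : pvSplitA t with _ | ⟨p, ps⟩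
        · exact absurd hs (pvSplitA_ne_nil t)
        · simp [pvSplitA, hc, pvConsH, hs]

lemma pvSplitOn_eq (s : List Char) : PySem.Chars.splitOn s ['a'] = pvSplitA s := by
  rw [PySem.Chars.splitOn, pvSplit_go (s.length + 1) s [] [] (by omega)]
  rcases hs : pvSplitA s with _ | ⟨p, ps⟩
  · exact absurd hs (pvSplitA_ne_nil s)
  · simp [pvConsH]

-- slice [1:-1] of a nonempty list
lemma pvSlice_1_neg1 {α : Type} (l : List α) (h : l ≠ []) :
    PySem.List.slice l (some 1) (some (-1)) = (l.drop 1).dropLast := by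
  have hn : 1 ≤ l.length := List.length_pos_of_ne_nil h
  simp only [PySem.List.slice, PySem.List.clampIdx]
  norm_num
  rw [if_neg h, show min 1 l.length = 1 by omega, List.dropLast_eq_take, ← List.drop_one]
  simp only [List.length_drop]
  congr 1
  omega

-- middle form equals the interior product of the parts
lemma pvGp_one (parts : List (List Char)) :
    pvGp parts 1 = (parts.dropLast.map (fun p => (p.length : Int) + 1)).prod := by
  match parts with
  | [] => simp [pvGp]
  | [p] => simp [pvGp]
  | p :: q :: rest =>
    rw [pvGp, pvGp_one (q :: rest)]
    simp only [List.dropLast_cons_of_ne_nil (List.cons_ne_nil q rest), List.map_cons,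
      List.prod_cons]
    ring

lemma pvRec2_gp (t : List Char) : ∀ d : Int,
    pvRec2 t d = pvGp (pvSplitA (t.map pvNorm)) d := by
  induction t with
  | nil => intro d; simp [pvRec2, pvSplitA, pvGp]
  | cons c t ih =>
    intro d
    by_cases hv : c ∈ ['a', 'e', 'i', 'o', 'u']
    · have hn : pvNorm c = 'a' := by simp [pvNorm, hv]
      simp only [List.map_cons, hn, pvSplitA]
      rcases hs : pvSplitA (t.map pvNorm) with _ | ⟨p, ps⟩
      · exact absurd hs (pvSplitA_ne_nil _)
      · rw [pvRec2, if_pos hv, ih 1, hs]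
        simp [pvGp]
    · have hn : pvNorm c = c := by simp [pvNorm, hv]
      have hca : c ≠ 'a' := fun h => hv (by simp [h])
      simp only [List.map_cons, hn, pvSplitA, if_neg hca]
      rcases hs : pvSplitA (t.map pvNorm) with _ | ⟨p, ps⟩
      · exact absurd hs (pvSplitA_ne_nil _)
      · rw [pvRec2, if_neg hv, ih (d + 1), hs]
        rcases ps with _ | ⟨q, rest⟩
        · simp [pvGp]
        · rw [pvGp, pvGp]
          push_cast [List.length_cons]
          ring

lemma pvRec1_interior (t : List Char) :
    pvRec1 t = pvInterior (pvSplitA (t.map pvNorm)) := by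
  induction t with
  | nil => simp [pvRec1, pvSplitA, pvInterior]
  | cons c t ih =>
    by_cases hv : c ∈ ['a', 'e', 'i', 'o', 'u']
    · have hn : pvNorm c = 'a' := by simp [pvNorm, hv]
      simp only [List.map_cons, hn, pvSplitA]
      rw [pvRec1, if_pos hv, pvRec2_gp t 1, pvInterior]
      simp only [List.drop_one]
      exact pvGp_one _
    · have hn : pvNorm c = c := by simp [pvNorm, hv]
      have hca : c ≠ 'a' := fun h => hv (by simp [h])
      simp only [List.map_cons, hn, pvSplitA, if_neg hca]
      rw [pvRec1, if_neg hv, ih]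
      rcases hs : pvSplitA (t.map pvNorm) with _ | ⟨p, ps⟩
      · exact absurd hs (pvSplitA_ne_nil _)
      · simp [pvInterior]

-- ===== VERDICT (by name: the statement is the Claim_ definition above) =====
theorem cutting_spec : Claim_equal_cutting := by
  intro slowo _
  show cutting slowo = cutting_alt slowo
  unfold cutting cutting_alt
  simp only []
  -- A side
  have hfold := PySem.List.foldl_append_if
      (fun i => decide (PySem.List.pyGetD slowo.toList i ' ' ∈ ['a', 'e', 'i', 'o', 'u']))
      (fun i : Int => i)
      (PySem.List.pyRange 0 (slowo.toList.length : Int) 1) []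
  simp only [decide_eq_true_eq, List.nil_append, List.map_id'] at hfold
  rw [hfold]
  have hpos := pvA_pos_gen slowo.toList slowo.toList 0 (by simp)
  simp only [Nat.cast_zero, zero_add] at hpos
  rw [hpos, pvFoldl_mul, pvMap_gaps, one_mul]
  -- B side
  rw [pvNorm_fold, pvSplitOn_eq, pvSlice_1_neg1 _ (pvSplitA_ne_nil _), pvFoldl_mul, one_mul]
  have hA : (List.zipWith (fun a b => b - a) (pvVpos (PySem.List.enumerate slowo.toList 0))
      (pvVpos (PySem.List.enumerate slowo.toList 0)).tail).prod
      = pvGapProd (pvVpos (PySem.List.enumerate slowo.toList 0)) := rfl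
  rw [hA, ← pvRec1_gap slowo.toList 0, pvRec1_interior]
  rfl
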